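-- pv_equiv track=rewrite | github.com/urusevsky/food-delivery-simulation | delivery_sim/analysis_pipeline/extraction_engine.py | extract_for_one_level_pattern
-- ===== SOURCE A (Python) =====
-- def extract_for_one_level_pattern(replication_level_metrics):
--     """
--     Extract all scalar values across replications for one-level pattern.
--
--     Args:
--         replication_level_metrics: List of replication dictionaries
--
--     Returns:
--         dict: {metric_name: [values_across_replications]}
--     """
--     scalar_data = {}
--
--     if not replication_level_metrics:
--         return scalar_data
--
--     # Get all metric names from first replication
--     metric_names = list(replication_level_metrics[0].keys())
--
--     for metric_name in metric_names:
--         scalar_data[metric_name] = [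
--             rep_result[metric_name]
--             for rep_result in replication_level_metrics
--             if metric_name in rep_result
--         ]
--
--     return scalar_data
-- ===== SOURCE B (Python) =====
-- def extract_for_one_level_pattern(replication_level_metrics):
--     """
--     Extract all scalar values across replications for one-level pattern.
--     Group-by over the flattened (name, value) items of every replication,
--     then project onto the first replication's key order.
--     """
--     if not replication_level_metrics:
--         return {}
--     groups = {}
--     for rep_result in replication_level_metrics:
--         for name, value in rep_result.items():
--             groups.setdefault(name, []).append(value)
--     return {name: groups[name] for name in replication_level_metrics[0]}
-- ===== Notes on version B (the rewrite author's own statement) =====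
-- stated objective: alternative
-- what changed: B replaces A's per-metric scans of all replications (with membership tests) by a single group-by over the flattened (name, value) items of every replication, followed by a projection of the group dict onto the first replication's key order.
import Mathlib
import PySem

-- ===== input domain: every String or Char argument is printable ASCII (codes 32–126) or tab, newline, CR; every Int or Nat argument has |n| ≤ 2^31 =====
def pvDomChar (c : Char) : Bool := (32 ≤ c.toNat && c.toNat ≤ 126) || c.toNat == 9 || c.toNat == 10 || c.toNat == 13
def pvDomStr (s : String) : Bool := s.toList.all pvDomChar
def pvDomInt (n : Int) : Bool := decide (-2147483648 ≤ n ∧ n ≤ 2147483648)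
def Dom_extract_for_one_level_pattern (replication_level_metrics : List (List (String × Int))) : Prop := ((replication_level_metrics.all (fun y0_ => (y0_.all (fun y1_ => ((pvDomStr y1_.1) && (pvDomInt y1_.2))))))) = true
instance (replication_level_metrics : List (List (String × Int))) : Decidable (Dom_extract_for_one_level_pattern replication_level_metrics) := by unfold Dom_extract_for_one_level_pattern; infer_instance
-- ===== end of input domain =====

-- B: instead of A's one full scan of all replications per metric name, group-by over the
-- flattened (name, value) items of every replication, then project onto the first
-- replication's key order (alternative decomposition, same cost).

-- ===== PORT A =====
-- Each inner assoc list is a Python dict; rebuild it with PySem.Dict.ofList (Python dict semantics).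
def extract_for_one_level_pattern (replication_level_metrics : List (List (String × Int))) : List (String × List Int) :=
  let reps := replication_level_metrics.map (fun l => PySem.Dict.ofList l)
  match reps with
  | [] => []
  | first :: _ =>
    let metric_names := PySem.Dict.keys first
    (metric_names.foldl
      (fun scalar_data name =>
        scalar_data.insert name
          (reps.filterMap (fun rep_result => rep_result.get? name)))
      PySem.Dict.empty).items

-- ===== PORT B =====
-- groups.setdefault(name, []).append(value)  =  Dict.modify name [] (· ++ [value])
def extract_for_one_level_pattern_alt (replication_level_metrics : List (List (String × Int))) : List (String × List Int) :=
  let reps := replication_level_metrics.map (fun l => PySem.Dict.ofList l)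
  match reps with
  | [] => []
  | first :: _ =>
    let groups :=
      reps.foldl
        (fun g rep_result =>
          rep_result.items.foldl (fun g p => g.modify p.1 [] (fun l => l ++ [p.2])) g)
        PySem.Dict.empty
    (PySem.Dict.keys first).map (fun name => (name, groups.getD name []))

-- ===== PRECONDITION & SPEC =====
def Spec_extract_for_one_level_pattern (replication_level_metrics : List (List (String × Int))) (out : List (String × List Int)) : Prop := out = extract_for_one_level_pattern_alt replication_level_metrics
instance (replication_level_metrics : List (List (String × Int))) (out : List (String × List Int)) : Decidable (Spec_extract_for_one_level_pattern replication_level_metrics out) := by unfold Spec_extract_for_one_level_pattern; infer_instance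

-- ===== CLAIM (what is proved, stated in full; the proofs are below) =====
def Claim_equal_extract_for_one_level_pattern : Prop := ∀ (replication_level_metrics : List (List (String × Int))), Dom_extract_for_one_level_pattern replication_level_metrics → Spec_extract_for_one_level_pattern replication_level_metrics (extract_for_one_level_pattern replication_level_metrics)

-- ===== LEMMAS AND PROOFS =====

-- in a list of pairs with distinct keys, the values filtered at a present key are exactly [v]
lemma pv_filter_nodup (l : List (String × Int)) (h : (l.map Prod.fst).Nodup) (n : String) (v : Int)
    (hm : (n, v) ∈ l) :
    (l.filter (fun p => p.1 == n)).map Prod.snd = [v] := by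
  induction l with
  | nil => cases hm
  | cons p rest ih =>
    simp only [List.map_cons, List.nodup_cons] at h
    rcases List.mem_cons.mp hm with rfl | hmem
    · have : rest.filter (fun p => p.1 == n) = [] := by
        refine List.filter_eq_nil_iff.mpr (fun q hq => ?_)
        simp only [beq_iff_eq]
        exact fun he => h.1 (List.mem_map.mpr ⟨q, hq, he⟩)
      simp [this]
    · have hne : p.1 ≠ n := fun he => h.1 (List.mem_map.mpr ⟨(n, v), hmem, he.symm⟩)
      simp only [List.filter_cons, beq_iff_eq, if_neg hne]
      exact ih h.2 hmem

-- filtered items of a dict with nodup keys = Option.toList of its lookup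
lemma pv_filter_items (rep : PySem.Dict String Int) (h : rep.keys.Nodup) (n : String) :
    (rep.items.filter (fun p => p.1 == n)).map Prod.snd = (rep.get? n).toList := by
  cases hg : rep.get? n with
  | none =>
    have hnk : n ∉ rep.keys := (PySem.Dict.get?_eq_none_iff_not_mem_keys rep n).mp hg
    have : rep.items.filter (fun p => p.1 == n) = [] := by
      refine List.filter_eq_nil_iff.mpr (fun q hq => ?_)
      simp only [beq_iff_eq]
      exact fun he => hnk (he ▸ PySem.Dict.mem_keys_of_mem_items rep hq)
    simp [this]
  | some v =>
    have hm : (n, v) ∈ rep.items := PySem.Dict.mem_items_of_get?_eq_some rep hg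
    have := pv_filter_nodup rep.items (by simpa [PySem.Dict.keys] using h) n v hm
    simpa using this

-- the group-by fold: each key accumulates exactly its lookups across the replications
lemma pv_groups_getD (reps : List (PySem.Dict String Int)) (hnd : ∀ r ∈ reps, r.keys.Nodup)
    (g : PySem.Dict String (List Int)) (n : String) :
    (reps.foldl
        (fun g rep => rep.items.foldl (fun g p => g.modify p.1 [] (fun l => l ++ [p.2])) g)
        g).getD n []
      = g.getD n [] ++ reps.filterMap (fun rep => rep.get? n) := by
  induction reps generalizing g with
  | nil => simp
  | cons rep rest ih =>
    simp only [List.foldl_cons]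
    rw [ih (fun r hr => hnd r (List.mem_cons_of_mem rep hr))]
    rw [PySem.Dict.getD_foldl_modify_append]
    rw [pv_filter_items rep (hnd rep List.mem_cons_self) n]
    cases h : rep.get? n with
    | none => simp [h]
    | some v => simp [h]

-- ===== VERDICT (by name: the statement is the Claim_ definition above) =====
theorem extract_for_one_level_pattern_spec : Claim_equal_extract_for_one_level_pattern := by
  intro rms _
  show extract_for_one_level_pattern rms = extract_for_one_level_pattern_alt rms
  cases rms with
  | nil => rfl
  | cons l t =>
    unfold extract_for_one_level_pattern extract_for_one_level_pattern_alt
    simp only [List.map_cons]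
    set first := PySem.Dict.ofList l with hfirst
    set reps := first :: t.map (fun l => PySem.Dict.ofList l) with hreps
    set names := PySem.Dict.keys first with hnames
    have hnd : names.Nodup := PySem.Dict.nodup_keys_ofList l
    -- A side: fold of inserts of fresh distinct keys into the empty dict
    have hA := PySem.Dict.items_foldl_insert_fresh (l := names)
      (k := fun a => a) (v := fun n => reps.filterMap (fun rep => rep.get? n))
      (d := (PySem.Dict.empty : PySem.Dict String (List Int)))
      (by intro a _; exact PySem.Dict.contains_empty a) (by simpa using hnd)
    -- B side: the group-by lemma at each name of the first replication
    have hrepnd : ∀ r ∈ reps, r.keys.Nodup := by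
      intro r hr
      rcases List.mem_cons.mp hr with rfl | hmem
      · exact PySem.Dict.nodup_keys_ofList l
      · rcases List.mem_map.mp hmem with ⟨l', _, rfl⟩
        exact PySem.Dict.nodup_keys_ofList l'
    have hB : ∀ n,
        (reps.foldl
            (fun g rep => rep.items.foldl (fun g p => g.modify p.1 [] (fun l => l ++ [p.2])) g)
            PySem.Dict.empty).getD n []
          = reps.filterMap (fun rep => rep.get? n) := by
      intro n
      rw [pv_groups_getD reps hrepnd PySem.Dict.empty n]
      simp
    rw [hA]
    have hemp : (PySem.Dict.empty : PySem.Dict String (List Int)).items = [] := rfl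
    rw [hemp, List.nil_append]
    refine List.map_congr_left (fun n _ => ?_)
    rw [hB n]
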